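-- pv_equiv track=rewrite | github.com/daniel-reich/ubiquitous-fiesta | HzeTvQqnH2afZs6GY_3.py | generate_rug
-- ===== SOURCE A (Python) =====
-- def generate_rug(n, direction):
--   rug=[]
--   for i in range(n):
--     rugrow = []
--     for j in range(n-i):
--       rugrow.append(n-i-j-1)
--     for j in range(i):
--       rugrow.append(j+1)
--     if(direction == "left"):
--       rugrow = rugrow[::-1]
--     rug.append(rugrow)
--   return(rug)
-- ===== SOURCE B (Python) =====
-- def generate_rug(n, direction):
--     if direction == "left":
--         return [[abs(i - k) for k in range(n)] for i in range(n)]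
--     return [[abs(k - (n - 1 - i)) for k in range(n)] for i in range(n)]
-- ===== Notes on version B (the rewrite author's own statement) =====
-- stated objective: simpler
-- what changed: Each cell is computed directly by a closed-form absolute-distance formula (abs(i-k) for 'left', abs(k-(n-1-i)) otherwise) in one comprehension per row, replacing A's two append loops per row plus a conditional reversal.
import Mathlib
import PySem

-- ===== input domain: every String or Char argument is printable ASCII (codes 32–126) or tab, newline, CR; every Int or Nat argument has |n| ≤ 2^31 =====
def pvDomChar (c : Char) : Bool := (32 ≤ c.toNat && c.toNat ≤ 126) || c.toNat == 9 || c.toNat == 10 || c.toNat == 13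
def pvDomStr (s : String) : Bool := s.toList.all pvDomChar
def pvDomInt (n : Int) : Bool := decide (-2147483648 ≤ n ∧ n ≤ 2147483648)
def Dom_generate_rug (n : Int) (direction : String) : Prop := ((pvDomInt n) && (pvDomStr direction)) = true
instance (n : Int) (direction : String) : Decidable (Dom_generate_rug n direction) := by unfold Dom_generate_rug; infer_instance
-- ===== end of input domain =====

-- B computes each cell by a closed-form absolute-distance formula instead of A's
-- two append loops per row plus a conditional reversal (objective: simpler).

-- ===== PORT A =====
def generate_rug (n : Int) (direction : String) : List (List Int) :=
  (PySem.List.pyRange 0 n 1).foldl (fun rug i =>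
    let rugrow : List Int := (PySem.List.pyRange 0 (n - i) 1).foldl (fun r j => r ++ [n - i - j - 1]) []
    let rugrow := (PySem.List.pyRange 0 i 1).foldl (fun r j => r ++ [j + 1]) rugrow
    let rugrow := if direction == "left" then rugrow.reverse else rugrow
    rug ++ [rugrow]) []

-- ===== PORT B =====
def generate_rug_alt (n : Int) (direction : String) : List (List Int) :=
  if direction == "left" then
    (PySem.List.pyRange 0 n 1).map (fun i => (PySem.List.pyRange 0 n 1).map (fun k => |i - k|))
  else
    (PySem.List.pyRange 0 n 1).map (fun i => (PySem.List.pyRange 0 n 1).map (fun k => |k - (n - 1 - i)|))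

-- ===== PRECONDITION & SPEC =====
def Spec_generate_rug (n : Int) (direction : String) (out : List (List Int)) : Prop := out = generate_rug_alt n direction
instance (n : Int) (direction : String) (out : List (List Int)) : Decidable (Spec_generate_rug n direction out) := by unfold Spec_generate_rug; infer_instance

-- ===== CLAIM (what is proved, stated in full; the proofs are below) =====
def Claim_equal_generate_rug : Prop := ∀ (n : Int) (direction : String), Dom_generate_rug n direction → Spec_generate_rug n direction (generate_rug n direction)

-- ===== LEMMAS AND PROOFS =====

-- A's row i (before the optional reversal) equals the closed-form row of B's non-left branch.
theorem pv_row_eq (n i : Int) (h0 : 0 ≤ i) (h1 : i < n) :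
    (PySem.List.pyRange 0 (n - i) 1).map (fun j => n - i - j - 1)
      ++ (PySem.List.pyRange 0 i 1).map (fun j => j + 1)
    = (PySem.List.pyRange 0 n 1).map (fun k => |k - (n - 1 - i)|) := by
  rw [PySem.List.pyRange_one_append 0 (n - i) n (by omega) (by omega), List.map_append]
  congr 1
  · apply List.map_congr_left
    intro j hj
    rw [PySem.List.mem_pyRange_one] at hj
    rw [abs_of_nonpos (by omega)]
    omega
  · rw [PySem.List.pyRange_one, PySem.List.pyRange_one]
    have hni : n - (n - i) = i := by omega
    have h0' : i - 0 = i := by omega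
    rw [hni, h0']
    simp only [List.map_map]
    apply List.map_congr_left
    intro k hk
    simp only [Function.comp]
    rw [abs_of_nonneg (by omega)]
    omega

-- Reversing a map over range(0, n) re-indexes by n-1-k.
theorem pv_rev_map (n : Int) (f : Int → Int) :
    ((PySem.List.pyRange 0 n 1).map f).reverse
      = (PySem.List.pyRange 0 n 1).map (fun k => f (n - 1 - k)) := by
  apply List.ext_getElem
  · simp
  · intro k h1 h2
    simp only [List.getElem_reverse, List.getElem_map, PySem.List.getElem_pyRange_one]
    congr 1
    simp only [List.length_map, List.length_reverse, PySem.List.length_pyRange_one] at h1 h2 ⊢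
    omega

theorem generate_rug_spec_aux (n : Int) (direction : String) :
    generate_rug n direction = generate_rug_alt n direction := by
  unfold generate_rug generate_rug_alt
  simp only [PySem.List.foldl_append_singleton_eq_map, List.nil_append]
  by_cases h : direction == "left"
  · simp only [h, if_pos]
    apply List.map_congr_left
    intro i hi
    rw [PySem.List.mem_pyRange_one] at hi
    rw [pv_row_eq n i hi.1 hi.2, pv_rev_map]
    apply List.map_congr_left
    intro k _
    have : n - 1 - k - (n - 1 - i) = i - k := by ring
    rw [this]
  · simp only [h, if_neg, Bool.false_eq_true, not_false_iff]
    apply List.map_congr_left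
    intro i hi
    rw [PySem.List.mem_pyRange_one] at hi
    exact pv_row_eq n i hi.1 hi.2

-- ===== VERDICT (by name: the statement is the Claim_ definition above) =====
theorem generate_rug_spec : Claim_equal_generate_rug := by
  intro n direction _
  exact generate_rug_spec_aux n direction
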